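-- pv_equiv track=rewrite | github.com/AliNisarAhmed/algo-ds-practice | python/leetcode/strings/vowels.py | more_vowels
-- ===== SOURCE A (Python) =====
-- VOWELS = ['a', 'e', 'i', 'o', 'u']
--
-- def more_vowels(s, index = 0, count = 0):
-- 	l = len(s)
-- 	if index >= l:
-- 		return count > (l // 2)
-- 	else:
-- 		if s[index] in VOWELS:
-- 			return more_vowels(s, index + 1, count + 1)
-- 		else:
-- 			return more_vowels(s, index + 1, count)
-- ===== SOURCE B (Python) =====
-- VOWELS = ['a', 'e', 'i', 'o', 'u']
--
-- def more_vowels(s, index=0, count=0):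
--     total = count + sum(1 for c in s[index:] if c in VOWELS)
--     return total > len(s) // 2
-- ===== Notes on version B (the rewrite author's own statement) =====
-- stated objective: simpler
-- what changed: Replaces the accumulator-passing recursion over character indices with a single direct pass: count the vowels in the suffix s[index:] with a comprehension and compare count + that sum to len(s)//2.
-- outside the precondition, e.g. on more_vowels('aa', -1, 0): A returns True, B returns False; on more_vowels('a', -2, 0): A raises IndexError, B returns True
import Mathlib
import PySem

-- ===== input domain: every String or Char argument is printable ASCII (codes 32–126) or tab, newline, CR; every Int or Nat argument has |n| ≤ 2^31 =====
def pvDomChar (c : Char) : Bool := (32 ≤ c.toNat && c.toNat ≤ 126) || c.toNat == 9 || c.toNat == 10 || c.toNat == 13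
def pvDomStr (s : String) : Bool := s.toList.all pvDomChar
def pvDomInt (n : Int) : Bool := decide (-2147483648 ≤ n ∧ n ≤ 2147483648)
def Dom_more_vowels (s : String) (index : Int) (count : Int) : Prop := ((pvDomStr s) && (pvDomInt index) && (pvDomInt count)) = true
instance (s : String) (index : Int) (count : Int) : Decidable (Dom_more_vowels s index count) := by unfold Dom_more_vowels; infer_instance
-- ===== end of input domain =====

-- B replaces the accumulator-passing recursion with one direct pass over s[index:]; objective: simpler.

-- ===== PORT A =====
def pvVowels : List Char := ['a', 'e', 'i', 'o', 'u']

def more_vowels (s : String) (index : Int) (count : Int) : Bool :=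
  if _h : index ≥ PySem.Str.len s then
    decide (count > PySem.Int.floordiv (PySem.Str.len s) 2)
  else
    match PySem.Str.pyGet? s index with
    | some c =>
        if pvVowels.contains c then more_vowels s (index + 1) (count + 1)
        else more_vowels s (index + 1) count
    | none => false   -- IndexError in Python (index < -len(s)); excluded by Pre_
termination_by (PySem.Str.len s - index).toNat
decreasing_by all_goals (simp only [PySem.Str.len_eq] at *; omega)

-- ===== PORT B =====
def more_vowels_alt (s : String) (index : Int) (count : Int) : Bool :=
  let total : Int :=
    count + (((PySem.Str.slice s (some index) none).toList.filter
                (fun c => pvVowels.contains c)).length : Int)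
  decide (total > PySem.Int.floordiv (PySem.Str.len s) 2)

-- ===== PRECONDITION & SPEC =====
-- Pre_ excludes negative index, on which A either raises IndexError (index < -len(s)) or,
-- via Python's negative-index wraparound, counts the tail characters twice — an accident
-- of the recursive implementation that no caller of this default-argument helper relies on.
def Pre_more_vowels (s : String) (index : Int) (count : Int) : Prop := 0 ≤ index
instance (s : String) (index : Int) (count : Int) : Decidable (Pre_more_vowels s index count) := by
  unfold Pre_more_vowels; infer_instance

def pvWitness_more_vowels : String × Int × Int := ("hello", 0, 0)

def Spec_more_vowels (s : String) (index : Int) (count : Int) (out : Bool) : Prop := out = more_vowels_alt s index count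
instance (s : String) (index : Int) (count : Int) (out : Bool) : Decidable (Spec_more_vowels s index count out) := by unfold Spec_more_vowels; infer_instance

-- ===== CLAIM (what is proved, stated in full; the proofs are below) =====
def Claim_equal_more_vowels : Prop := ∀ (s : String) (index : Int) (count : Int), Dom_more_vowels s index count → Pre_more_vowels s index count → Spec_more_vowels s index count (more_vowels s index count)

-- ===== LEMMAS AND PROOFS =====

-- A's recursion from position `index` computes: (count + #vowels in the suffix) > len//2.
lemma more_vowels_eq_suffix_count (s : String) :
    ∀ (n : Nat) (index count : Int), 0 ≤ index → s.toList.length - index.toNat ≤ n →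
      more_vowels s index count =
        decide (count + (((s.toList.drop index.toNat).filter
            (fun c => pvVowels.contains c)).length : Int)
          > PySem.Int.floordiv (PySem.Str.len s) 2) := by
  intro n
  induction n with
  | zero =>
      intro index count h0 hn
      rw [more_vowels]
      have hge : index ≥ PySem.Str.len s := by
        simp only [PySem.Str.len_eq]; omega
      rw [dif_pos hge]
      have : s.toList.drop index.toNat = [] := by
        apply List.drop_eq_nil_of_le; omega
      simp [this]
  | succ n ih =>
      intro index count h0 hn
      by_cases hge : index ≥ PySem.Str.len s
      · rw [more_vowels, dif_pos hge]
        have : s.toList.drop index.toNat = [] := by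
          apply List.drop_eq_nil_of_le
          simp only [PySem.Str.len_eq] at hge; omega
        simp [this]
      · have hlt : index.toNat < s.toList.length := by
          simp only [PySem.Str.len_eq] at hge; omega
        rw [more_vowels, dif_neg hge]
        have hget : PySem.Str.pyGet? s index = some (s.toList[index.toNat]) := by
          obtain ⟨k, rfl⟩ : ∃ k : Nat, index = (k : Int) := ⟨index.toNat, by omega⟩
          simp
        rw [hget]; dsimp only
        have hdrop : s.toList.drop index.toNat
            = s.toList[index.toNat] :: s.toList.drop (index.toNat + 1) :=
          List.drop_eq_getElem_cons hlt
        have htn : (index + 1).toNat = index.toNat + 1 := by omega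
        by_cases hv : pvVowels.contains (s.toList[index.toNat])
        · rw [if_pos hv, ih (index + 1) (count + 1) (by omega) (by omega), htn]
          rw [hdrop]
          simp only [List.filter_cons, hv, if_pos, List.length_cons]
          rw [decide_eq_decide]
          push_cast
          omega
        · rw [if_neg hv, ih (index + 1) count (by omega) (by omega), htn]
          rw [hdrop, List.filter_cons, if_neg hv]

-- B's slice is the same suffix when 0 ≤ index.
lemma alt_eq_suffix_count (s : String) (index count : Int) (h0 : 0 ≤ index) :
    more_vowels_alt s index count =
      decide (count + (((s.toList.drop index.toNat).filter
          (fun c => pvVowels.contains c)).length : Int)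
        > PySem.Int.floordiv (PySem.Str.len s) 2) := by
  unfold more_vowels_alt
  have : (PySem.Str.slice s (some index) none).toList = s.toList.drop index.toNat := by
    simp [PySem.Str.slice, PySem.List.slice_from _ h0]
  rw [this]

-- ===== VERDICT (by name: the statement is the Claim_ definition above) =====
theorem more_vowels_spec : Claim_equal_more_vowels := by
  intro s index count _hd hpre
  unfold Spec_more_vowels
  rw [more_vowels_eq_suffix_count s (s.toList.length) index count hpre (by omega),
      alt_eq_suffix_count s index count hpre]
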